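-- pv_equiv track=rewrite | github.com/starsdog/companyParser | parser.py | parse_content_by_separate
-- ===== SOURCE A (Python) =====
-- def parse_content_by_separate(content, separate_list):
--     result_list=[]
--     for i in range(0, len(separate_list)):
--         separate=separate_list[i]
--         result=''
--         separate_start_idx=content.find(separate)
--         if separate_start_idx!=-1:
--             if i!=(len(separate_list)-1):
--                 next_separate=separate_list[i+1]
--                 separate_end_idx=content.find(next_separate)
--                 if separate_end_idx!=-1:
--                     result=content[separate_start_idx:separate_end_idx]
--                 else:
--                     result=content[separate_start_idx:]
--             else:
--                 result=content[separate_start_idx:]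
--         if len(result):
--             result_list.append(result)
--
--     return result_list
-- ===== SOURCE B (Python) =====
-- def parse_content_by_separate(content, separate_list):
--     out = []
--     end = -1  # find-position of the separator processed just before (the next one in forward order)
--     for sep in reversed(separate_list):
--         p = content.find(sep)
--         if p != -1:
--             piece = content[p:] if end == -1 else content[p:end]
--             if piece:
--                 out.append(piece)
--         end = p
--     out.reverse()
--     return out
-- ===== Notes on version B (the rewrite author's own statement) =====
-- stated objective: alternative
-- what changed: B replaces A's forward index loop, which re-searches the following separator inside every iteration, by a single backwards pass over the separators with an accumulator holding the next separator's find position, building the output back-to-front and calling find exactly once per separator.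
import Mathlib
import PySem

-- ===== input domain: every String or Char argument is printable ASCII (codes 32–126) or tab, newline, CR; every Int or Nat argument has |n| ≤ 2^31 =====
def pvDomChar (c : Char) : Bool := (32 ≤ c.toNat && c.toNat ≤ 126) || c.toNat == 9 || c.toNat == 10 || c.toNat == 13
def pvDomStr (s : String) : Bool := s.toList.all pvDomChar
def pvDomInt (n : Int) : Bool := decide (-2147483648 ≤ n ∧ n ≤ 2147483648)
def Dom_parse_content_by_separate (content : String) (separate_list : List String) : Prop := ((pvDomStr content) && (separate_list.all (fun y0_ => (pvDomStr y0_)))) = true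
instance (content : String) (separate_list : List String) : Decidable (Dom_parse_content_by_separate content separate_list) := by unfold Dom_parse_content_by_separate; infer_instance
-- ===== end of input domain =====

-- B makes a single backwards pass with an accumulator carrying the next separator's find
-- position, building the output back-to-front and searching each separator once, instead of
-- A's forward index loop that re-searches the following separator inside every iteration
-- (objective: alternative).

-- ===== PORT A =====
-- the `result` computed by A's loop body at index i (a pure function of i)
def pvResult (content : String) (separate_list : List String) (i : Int) : String :=
  let separate := (PySem.List.pyGet? separate_list i).getD ""
  let separate_start_idx := PySem.Str.find content separate
  if separate_start_idx ≠ -1 then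
    if i ≠ (separate_list.length : Int) - 1 then
      let next_separate := (PySem.List.pyGet? separate_list (i + 1)).getD ""
      let separate_end_idx := PySem.Str.find content next_separate
      if separate_end_idx ≠ -1 then
        PySem.Str.slice content (some separate_start_idx) (some separate_end_idx)
      else
        PySem.Str.slice content (some separate_start_idx) none
    else
      PySem.Str.slice content (some separate_start_idx) none
  else ""

def parse_content_by_separate (content : String) (separate_list : List String) : List String :=
  (PySem.List.pyRange 0 (separate_list.length : Int) 1).foldl
    (fun result_list i =>
      if PySem.Str.len (pvResult content separate_list i) != 0 then
        result_list ++ [pvResult content separate_list i]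
      else result_list) []

-- ===== PORT B =====
-- single reverse pass; state = (out, end) with end = find position of the previously
-- processed (i.e. following) separator, -1 meaning "slice to end of string"
def parse_content_by_separate_alt (content : String) (separate_list : List String) : List String :=
  let st := separate_list.reverse.foldl
    (fun (st : List String × Int) sep =>
      let p := PySem.Str.find content sep
      let out :=
        if p != -1 then
          let piece := if st.2 == -1 then PySem.Str.slice content (some p) none
                       else PySem.Str.slice content (some p) (some st.2)
          if piece != "" then st.1 ++ [piece] else st.1
        else st.1
      (out, p)) ([], -1)
  st.1.reverse

-- ===== PRECONDITION & SPEC =====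
def Spec_parse_content_by_separate (content : String) (separate_list : List String) (out : List String) : Prop := out = parse_content_by_separate_alt content separate_list
instance (content : String) (separate_list : List String) (out : List String) : Decidable (Spec_parse_content_by_separate content separate_list out) := by unfold Spec_parse_content_by_separate; infer_instance

-- ===== CLAIM (what is proved, stated in full; the proofs are below) =====
def Claim_equal_parse_content_by_separate : Prop := ∀ (content : String) (separate_list : List String), Dom_parse_content_by_separate content separate_list → Spec_parse_content_by_separate content separate_list (parse_content_by_separate content separate_list)

-- ===== LEMMAS AND PROOFS =====
-- the piece contributed by a separator found at p whose successor is found at q (q = -1: none/last)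
def pvEmit (content : String) (p q : Int) : List String :=
  let piece := if p ≠ -1 then
      (if q = -1 then PySem.Str.slice content (some p) none
       else PySem.Str.slice content (some p) (some q))
    else ""
  if piece ≠ "" then [piece] else []

def pvRef (content : String) : List String → List String
  | [] => []
  | [s] => pvEmit content (PySem.Str.find content s) (-1)
  | s :: t :: r => pvEmit content (PySem.Str.find content s) (PySem.Str.find content t)
      ++ pvRef content (t :: r)

-- find-position of the head separator; -1 for the empty list
def pvHeadFind (content : String) : List String → Int
  | [] => -1
  | s :: _ => PySem.Str.find content s

theorem pvSliceEmpty (c : String) (a b : Option Int) :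
    PySem.Str.slice c a b = "" ↔ PySem.List.slice c.toList a b = [] := by
  simp [PySem.Str.slice]

-- A's append test versus pvEmit
theorem pvEmit_of_res (content : String) (p q : Int) (res : String)
    (h : res = if p ≠ -1 then
        (if q = -1 then PySem.Str.slice content (some p) none
         else PySem.Str.slice content (some p) (some q))
      else "") :
    (if PySem.Str.len res != 0 then [res] else []) = pvEmit content p q := by
  subst h
  simp only [pvEmit, PySem.Str.len]
  split_ifs <;> simp_all [pvSliceEmpty]

theorem pvEmit_len_le (content : String) (p q : Int) :
    (pvEmit content p q).reverse = pvEmit content p q := by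
  unfold pvEmit
  split_ifs <;> simp <;> split_ifs <;> simp

theorem pvRef_cons (content s : String) (t : List String) :
    pvRef content (s :: t)
      = pvEmit content (PySem.Str.find content s) (pvHeadFind content t) ++ pvRef content t := by
  cases t with
  | nil => simp [pvRef, pvHeadFind]
  | cons u r => simp [pvRef, pvHeadFind]

-- one step of B's fold emits exactly pvEmit
theorem pvStep (c : String) (p q : Int) (out : List String) :
    (if p != -1 then
       let piece := if q == -1 then PySem.Str.slice c (some p) none
                    else PySem.Str.slice c (some p) (some q)
       if piece != "" then out ++ [piece] else out
     else out) = out ++ pvEmit c p q := by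
  unfold pvEmit
  split_ifs <;> simp_all <;> split_ifs <;> simp

-- invariant of B's reverse fold
theorem pvB_state (content : String) (sl : List String) :
    sl.reverse.foldl
      (fun (st : List String × Int) sep =>
        let p := PySem.Str.find content sep
        let out :=
          if p != -1 then
            let piece := if st.2 == -1 then PySem.Str.slice content (some p) none
                         else PySem.Str.slice content (some p) (some st.2)
            if piece != "" then st.1 ++ [piece] else st.1
          else st.1
        (out, p)) ([], -1)
      = ((pvRef content sl).reverse, pvHeadFind content sl) := by
  induction sl with
  | nil => rfl
  | cons s t ih =>
    rw [List.reverse_cons, List.foldl_append, ih, List.foldl_cons, List.foldl_nil]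
    dsimp only
    rw [pvStep]
    have h2 : pvHeadFind content (s :: t) = PySem.Str.find content s := rfl
    rw [pvRef_cons, List.reverse_append, pvEmit_len_le, h2]

theorem pvB_eq_ref (content : String) (sl : List String) :
    parse_content_by_separate_alt content sl = pvRef content sl := by
  unfold parse_content_by_separate_alt
  rw [pvB_state]
  simp

-- A-side: index-0 result and the index shift
theorem pvResult_zero_cons2 (content s t : String) (r : List String) :
    pvResult content (s :: t :: r) ((0 : Nat) : Int) =
      (if PySem.Str.find content s ≠ -1 then
        (if PySem.Str.find content t = -1 then
          PySem.Str.slice content (some (PySem.Str.find content s)) none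
         else PySem.Str.slice content (some (PySem.Str.find content s))
              (some (PySem.Str.find content t)))
       else "") := by
  have hg0 : PySem.List.pyGet? (s :: t :: r) ((0 : Nat) : Int) = some s := by
    rw [PySem.List.pyGet?_natCast]; rfl
  have hg1 : (((0 : Nat) : Int) + 1) = ((1 : Nat) : Int) := by norm_num
  have hg1' : PySem.List.pyGet? (s :: t :: r) ((1 : Nat) : Int) = some t := by
    rw [PySem.List.pyGet?_natCast]; rfl
  have hc : ((0 : Nat) : Int) ≠ ((s :: t :: r).length : Int) - 1 := by
    simp only [List.length_cons]; push_cast; omega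
  simp only [pvResult, hg0, hg1, hg1', Option.getD_some]
  split_ifs <;> simp_all

theorem pvResult_zero_single (content s : String) :
    pvResult content [s] ((0 : Nat) : Int) =
      (if PySem.Str.find content s ≠ -1 then
        PySem.Str.slice content (some (PySem.Str.find content s)) none
       else "") := by
  have hg0 : PySem.List.pyGet? [s] ((0 : Nat) : Int) = some s := by
    rw [PySem.List.pyGet?_natCast]; rfl
  have hc : ¬ (((0 : Nat) : Int) ≠ (([s] : List String).length : Int) - 1) := by
    simp
  simp only [pvResult, hg0, hc, Option.getD_some]
  split_ifs <;> simp_all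

theorem pvResult_shift (content : String) (s : String) (t : List String) (_ht : 1 ≤ t.length)
    (k : Nat) : pvResult content (s :: t) (((k + 1 : Nat) : Int)) = pvResult content t (k : Int) := by
  have e2 : (((k + 1 : Nat) : Int) + 1) = ((k + 2 : Nat) : Int) := by push_cast; ring
  have e3 : ((k : Int) + 1) = ((k + 1 : Nat) : Int) := by push_cast; ring
  simp only [pvResult, e2, e3, PySem.List.pyGet?_natCast, List.length_cons]
  have hg1 : (s :: t)[k + 1]? = t[k]? := by simp
  have hg2 : (s :: t)[k + 2]? = t[k + 1]? := by
    show (s :: t)[(k + 1) + 1]? = t[k + 1]?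
    simp
  rw [hg1, hg2]
  have hcond : (((k + 1 : Nat) : Int) ≠ ((t.length + 1 : Nat) : Int) - 1) =
      ((k : Int) ≠ (t.length : Int) - 1) := by
    apply propext; push_cast; omega
  simp only [hcond]

def pvA (content : String) (sl : List String) : List String :=
  ((((List.range sl.length).map (fun k : Nat => (k : Int))).filter
      (fun i => PySem.Str.len (pvResult content sl i) != 0)).map
    (fun i => pvResult content sl i))

theorem pvA_eq (content : String) (sl : List String) :
    parse_content_by_separate content sl = pvA content sl := by
  unfold parse_content_by_separate
  rw [PySem.List.foldl_append_if (fun i => PySem.Str.len (pvResult content sl i) != 0)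
        (fun i => pvResult content sl i)]
  rw [PySem.List.pyRange_zero_natCast]
  rfl

theorem pvA_eq_ref (content : String) (sl : List String) :
    pvA content sl = pvRef content sl := by
  induction sl with
  | nil => rfl
  | cons s t ih =>
    have hsplit : ((List.range (s :: t).length).map (fun k : Nat => (k : Int)))
        = ((0 : Nat) : Int) :: ((List.range t.length).map (fun k : Nat => ((k + 1 : Nat) : Int))) := by
      simp only [List.length_cons, List.range_succ_eq_map, List.map_cons, List.map_map]
      rfl
    cases t with
    | nil =>
      show pvA content [s] = pvRef content [s]
      unfold pvA
      rw [hsplit]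
      simp only [List.length_nil, List.range_zero, List.map_nil, List.filter_cons,
        List.filter_nil]
      rw [pvRef]
      have h0 := pvResult_zero_single content s
      rw [← pvEmit_of_res content (PySem.Str.find content s) (-1) (pvResult content [s] ((0 : Nat) : Int)) (by rw [h0]; simp)]
      split_ifs <;> simp
    | cons t r =>
      show pvA content (s :: t :: r) = pvRef content (s :: t :: r)
      rw [pvRef, ← ih]
      unfold pvA
      have hshift : ((fun i => pvResult content (s :: t :: r) i) ∘ (fun k : Nat => ((k + 1 : Nat) : Int)))
          = ((fun i => pvResult content (t :: r) i) ∘ (fun k : Nat => (k : Int))) := by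
        funext k
        exact pvResult_shift content s (t :: r) (by simp) k
      have hpshift : ((fun i => PySem.Str.len (pvResult content (s :: t :: r) i) != 0) ∘ (fun k : Nat => ((k + 1 : Nat) : Int)))
          = ((fun i => PySem.Str.len (pvResult content (t :: r) i) != 0) ∘ (fun k : Nat => (k : Int))) := by
        funext k
        simp only [Function.comp]
        rw [pvResult_shift content s (t :: r) (by simp) k]
      have h0 := pvResult_zero_cons2 content s t r
      have hEmit : pvEmit content (PySem.Str.find content s) (PySem.Str.find content t)
          = if PySem.Str.len (pvResult content (s :: t :: r) ((0 : Nat) : Int)) != 0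
            then [pvResult content (s :: t :: r) ((0 : Nat) : Int)] else [] :=
        (pvEmit_of_res content (PySem.Str.find content s) (PySem.Str.find content t)
          (pvResult content (s :: t :: r) ((0 : Nat) : Int)) h0).symm
      rw [hsplit, List.filter_cons, hEmit]
      conv_rhs => rw [List.filter_map, List.map_map, ← hshift, ← hpshift]
      split_ifs with h0p <;> simp [List.filter_map, List.map_map]

-- ===== VERDICT (by name: the statement is the Claim_ definition above) =====
theorem parse_content_by_separate_spec : Claim_equal_parse_content_by_separate := by
  intro content separate_list _
  unfold Spec_parse_content_by_separate
  rw [pvA_eq, pvA_eq_ref, pvB_eq_ref]
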